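-- pv_equiv track=rewrite | github.com/galencraig/TestSimulator | testsim.py | parse_questions
-- ===== SOURCE A (Python) =====
-- def parse_questions(content):
--     questions = []
--     for item in content:
--         if isinstance(item, str):
--             lines = item.split("\n")
--             question = ""
--             answer_choices = []
--             correct_answers = ""
--             for line in lines:
--                 if line.startswith("Question #"):
--                     if question:
--                         questions.append((question, answer_choices, correct_answers))
--                     question = line
--                     answer_choices = []
--                     correct_answers = ""
--                 elif line.startswith("Correct Answer:"):
--                     correct_answers = line.split(":")[1].strip()
--                 elif line.startswith("A.") or line.startswith("B.") or line.startswith("C.") or line.startswith("D.") or line.startswith("E."):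
--                     answer_choices.append(line)
--             # Append the last question
--             if question:
--                 questions.append((question, answer_choices, correct_answers))
--     return questions
-- ===== SOURCE B (Python) =====
-- def parse_questions(content):
--     # Two-phase rewrite: one pass segments all lines into question blocks,
--     # then each block is parsed independently into its tuple.
--     blocks = []
--     for item in content:
--         if isinstance(item, str):
--             started = False
--             for ln in item.split("\n"):
--                 if ln.startswith("Question #"):
--                     blocks.append([ln])
--                     started = True
--                 elif started:
--                     blocks[-1].append(ln)
--     return [_parse_block(b) for b in blocks]
--
-- def _parse_block(block):
--     header, body = block[0], block[1:]
--     choices = [ln for ln in body if ln.startswith(("A.", "B.", "C.", "D.", "E."))]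
--     corrects = [ln for ln in body if ln.startswith("Correct Answer:")]
--     correct = corrects[-1].split(":")[1].strip() if corrects else ""
--     return (header, choices, correct)
-- ===== Notes on version B (the rewrite author's own statement) =====
-- stated objective: alternative
-- what changed: Replaces A's interleaved flush-on-boundary accumulator (question/answer_choices/correct_answers mutated and flushed at each marker and at item end) with a two-phase structure: a first pass only segments lines into blocks at 'Question #' markers (one prefix test per line instead of A's up-to-seven), then each block is parsed independently into its tuple with comprehensions.
import Mathlib
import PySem

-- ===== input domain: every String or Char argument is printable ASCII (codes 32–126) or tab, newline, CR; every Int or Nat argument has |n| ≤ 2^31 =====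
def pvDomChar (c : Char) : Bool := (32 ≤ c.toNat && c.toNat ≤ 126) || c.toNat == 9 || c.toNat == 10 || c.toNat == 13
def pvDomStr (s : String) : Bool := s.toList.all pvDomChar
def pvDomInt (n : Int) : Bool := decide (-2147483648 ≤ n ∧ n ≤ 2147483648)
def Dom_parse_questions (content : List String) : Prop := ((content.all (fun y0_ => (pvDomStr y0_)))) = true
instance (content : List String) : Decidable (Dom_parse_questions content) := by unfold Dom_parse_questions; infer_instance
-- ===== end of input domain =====

-- B replaces A's flush-on-boundary accumulator with segment-into-blocks then parse-each-block (alternative decomposition, same cost).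

-- shared tiny expression both Pythons contain literally: line.split(":")[1].strip()
-- (the line starts with "Correct Answer:", so index 1 always exists; getD "" only totalises)
def extractCorrect (line : String) : String :=
  PySem.Str.strip ((PySem.List.pyGet? ((PySem.Str.split? line ":").getD []) 1).getD "")

-- ===== PORT A =====
-- state = (questions, question, answer_choices, correct_answers)
def pqStep (st : List (String × List String × String) × String × List String × String)
    (line : String) : List (String × List String × String) × String × List String × String :=
  match st with
  | (qs, q, ac, ca) =>
    if PySem.Str.startswith line "Question #" then
      ((if q ≠ "" then qs ++ [(q, ac, ca)] else qs), line, [], "")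
    else if PySem.Str.startswith line "Correct Answer:" then
      (qs, q, ac, extractCorrect line)
    else if PySem.Str.startswith line "A." || PySem.Str.startswith line "B." ||
            PySem.Str.startswith line "C." || PySem.Str.startswith line "D." ||
            PySem.Str.startswith line "E." then
      (qs, q, ac ++ [line], ca)
    else (qs, q, ac, ca)

-- "Append the last question" at item end
def pqFlush (st : List (String × List String × String) × String × List String × String) :
    List (String × List String × String) :=
  match st with
  | (qs, q, ac, ca) => if q ≠ "" then qs ++ [(q, ac, ca)] else qs

-- the isinstance(item, str) test is always true here (content : List String)
def parse_questions (content : List String) : List (String × List String × String) :=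
  content.foldl (fun questions item =>
    pqFlush (((PySem.Str.split? item "\n").getD []).foldl pqStep (questions, "", [], ""))) []

-- ===== PORT B =====
def pqIsMarker (ln : String) : Bool := PySem.Str.startswith ln "Question #"
def pqIsCorrect (ln : String) : Bool := PySem.Str.startswith ln "Correct Answer:"
-- ln.startswith(("A.", "B.", "C.", "D.", "E.")) — tuple startswith is the disjunction
def pqIsChoice (ln : String) : Bool :=
  PySem.Str.startswith ln "A." || PySem.Str.startswith ln "B." ||
  PySem.Str.startswith ln "C." || PySem.Str.startswith ln "D." ||
  PySem.Str.startswith ln "E."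

-- blocks[-1].append(ln); only reached with blocks nonempty, [] case totalises
def pqAppendLast : List (List String) → String → List (List String)
  | [], _ => []
  | [b], ln => [b ++ [ln]]
  | b :: bs, ln => b :: pqAppendLast bs ln

-- phase 1 inner-loop body; state = (blocks, started)
def pqBStep (st : List (List String) × Bool) (ln : String) : List (List String) × Bool :=
  match st with
  | (blocks, started) =>
    if pqIsMarker ln then (blocks ++ [[ln]], true)
    else if started then (pqAppendLast blocks ln, started)
    else (blocks, started)

-- corrects[-1].split(":")[1].strip() if corrects else ""
def lastCorrect (ca : String) (body : List String) : String :=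
  match (body.filter pqIsCorrect).getLast? with
  | some c => extractCorrect c
  | none => ca

-- phase 2: one block → one tuple (block is never empty; [] case totalises)
def parseBlock (block : List String) : String × List String × String :=
  match block with
  | [] => ("", [], "")
  | h :: body => (h, body.filter pqIsChoice, lastCorrect "" body)

def parse_questions_alt (content : List String) : List (String × List String × String) :=
  (content.foldl (fun blocks item =>
    (((PySem.Str.split? item "\n").getD []).foldl pqBStep (blocks, false)).1) []).map parseBlock

-- ===== PRECONDITION & SPEC =====
def Spec_parse_questions (content : List String) (out : List (String × List String × String)) : Prop := out = parse_questions_alt content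
instance (content : List String) (out : List (String × List String × String)) : Decidable (Spec_parse_questions content out) := by unfold Spec_parse_questions; infer_instance

-- ===== CLAIM (what is proved, stated in full; the proofs are below) =====
def Claim_equal_parse_questions : Prop := ∀ (content : List String), Dom_parse_questions content → Spec_parse_questions content (parse_questions content)

-- ===== LEMMAS AND PROOFS =====

lemma pq_sw_head (t p : List Char) (a : Char)
    (h : PySem.Chars.startswith t (a :: p) = true) :
    ∃ u, t = a :: u ∧ PySem.Chars.startswith u p = true := by
  obtain ⟨s, hs⟩ := (PySem.Chars.startswith_iff t (a :: p)).mp h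
  exact ⟨p ++ s, by simpa using hs.symm, (PySem.Chars.startswith_iff _ _).mpr ⟨s, rfl⟩⟩

lemma pq_sw2 (l : String) (a b : Char) (p : String) (q : List Char)
    (h : PySem.Str.startswith l p = true) (hp : p.toList = a :: b :: q) :
    ∃ u, l.toList = a :: b :: u := by
  have h' : PySem.Chars.startswith l.toList (a :: b :: q) = true := by
    rw [← hp]; simpa using h
  obtain ⟨u, hu, h1⟩ := pq_sw_head _ _ _ h'
  obtain ⟨v, hv, -⟩ := pq_sw_head _ _ _ h1
  exact ⟨v, by rw [hu, hv]⟩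

lemma pq_correct_shape (l : String) (h : pqIsCorrect l = true) :
    ∃ u, l.toList = 'C' :: 'o' :: u :=
  pq_sw2 l 'C' 'o' "Correct Answer:" "rrect Answer:".toList h (by decide)

lemma pq_choice_shape (l : String) (h : pqIsChoice l = true) :
    ∃ a u, l.toList = a :: '.' :: u := by
  simp only [pqIsChoice, Bool.or_eq_true] at h
  rcases h with ((((h | h) | h) | h) | h)
  · exact ⟨'A', pq_sw2 l 'A' '.' "A." [] h (by decide)⟩
  · exact ⟨'B', pq_sw2 l 'B' '.' "B." [] h (by decide)⟩
  · exact ⟨'C', pq_sw2 l 'C' '.' "C." [] h (by decide)⟩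
  · exact ⟨'D', pq_sw2 l 'D' '.' "D." [] h (by decide)⟩
  · exact ⟨'E', pq_sw2 l 'E' '.' "E." [] h (by decide)⟩

lemma pq_correct_not_choice (l : String) (h : pqIsCorrect l = true) : pqIsChoice l = false := by
  cases hc : pqIsChoice l
  · rfl
  · obtain ⟨u, hu⟩ := pq_correct_shape l h
    obtain ⟨a, v, hv⟩ := pq_choice_shape l hc
    rw [hu] at hv
    injection hv with _ hv'
    injection hv' with h2 _
    exact absurd h2 (by decide)

lemma pq_marker_ne (l : String) (h : pqIsMarker l = true) : l ≠ "" := by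
  intro he; rw [he] at h; exact absurd h (by decide)

lemma pqAppendLast_append (bs : List (List String)) (lb : List String) (ln : String) :
    pqAppendLast (bs ++ [lb]) ln = bs ++ [lb ++ [ln]] := by
  induction bs with
  | nil => rfl
  | cons b bs ih =>
    cases bs with
    | nil => simp [pqAppendLast]
    | cons b' bs' => simpa [pqAppendLast] using ih

lemma lastCorrect_append_correct (ca : String) (body : List String) (ln : String)
    (h : pqIsCorrect ln = true) :
    lastCorrect ca (body ++ [ln]) = extractCorrect ln := by
  simp [lastCorrect, List.filter_append, h]

lemma lastCorrect_append_skip (ca : String) (body : List String) (ln : String)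
    (h : pqIsCorrect ln = false) :
    lastCorrect ca (body ++ [ln]) = lastCorrect ca body := by
  simp [lastCorrect, List.filter_append, h]

-- forward-simulation invariant between A's state and B's phase-1 state
def pqRel (stA : List (String × List String × String) × String × List String × String)
    (stB : List (List String) × Bool) : Prop :=
  match stA, stB with
  | (qs, q, ac, ca), (blocks, started) =>
    if q = "" then started = false ∧ blocks.map parseBlock = qs
    else started = true ∧ ∃ bs body, blocks = bs ++ [q :: body] ∧
      bs.map parseBlock = qs ∧ ac = body.filter pqIsChoice ∧ ca = lastCorrect "" body

lemma pqRel_step (stA : List (String × List String × String) × String × List String × String)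
    (stB : List (List String) × Bool) (ln : String) (h : pqRel stA stB) :
    pqRel (pqStep stA ln) (pqBStep stB ln) := by
  obtain ⟨qs, q, ac, ca⟩ := stA
  obtain ⟨blocks, started⟩ := stB
  by_cases hm : pqIsMarker ln = true
  · have hln : ln ≠ "" := pq_marker_ne ln hm
    have hm2 : PySem.Str.startswith ln "Question #" = true := by simpa [pqIsMarker] using hm
    have eB : pqBStep (blocks, started) ln = (blocks ++ [[ln]], true) := by
      simp [pqBStep, hm]
    by_cases hq : q = ""
    · subst hq
      simp only [pqRel, if_pos] at h
      obtain ⟨hs, hb⟩ := h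
      have eA : pqStep (qs, "", ac, ca) ln = (qs, ln, [], "") := by
        simp only [pqStep]
        rw [if_pos hm2, if_neg (by simp : ¬("" : String) ≠ "")]
      rw [eA, eB]
      simp only [pqRel, if_neg hln]
      refine ⟨?_, blocks, [], ?_, ?_, ?_, ?_⟩ <;> simp [hb, lastCorrect]
    · simp only [pqRel, if_neg hq] at h
      obtain ⟨hs, bs, body, hbl, hbs, hac, hca⟩ := h
      have eA : pqStep (qs, q, ac, ca) ln = (qs ++ [(q, ac, ca)], ln, [], "") := by
        simp only [pqStep]
        rw [if_pos hm2, if_pos hq]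
      rw [eA, eB]
      simp only [pqRel, if_neg hln]
      refine ⟨?_, blocks, [], ?_, ?_, ?_, ?_⟩ <;>
        simp [hbl, hbs, parseBlock, hac, hca, lastCorrect]
  · have hm' : pqIsMarker ln = false := by simpa using hm
    have hm2 : ¬ PySem.Str.startswith ln "Question #" = true :=
      fun hx => hm (by simp only [pqIsMarker]; exact hx)
    by_cases hq : q = ""
    · subst hq
      simp only [pqRel, if_pos] at h
      obtain ⟨hs, hb⟩ := h
      subst hs
      have eB : pqBStep (blocks, false) ln = (blocks, false) := by
        simp [pqBStep, hm']
      rw [eB]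
      by_cases hc : PySem.Str.startswith ln "Correct Answer:" = true
      · have eA : pqStep (qs, "", ac, ca) ln = (qs, "", ac, extractCorrect ln) := by
          simp only [pqStep]
          rw [if_neg hm2, if_pos hc]
        rw [eA]
        simp only [pqRel]
        exact ⟨trivial, hb⟩
      · by_cases hch : (PySem.Str.startswith ln "A." || PySem.Str.startswith ln "B." ||
            PySem.Str.startswith ln "C." || PySem.Str.startswith ln "D." ||
            PySem.Str.startswith ln "E.") = true
        · have eA : pqStep (qs, "", ac, ca) ln = (qs, "", ac ++ [ln], ca) := by
            simp only [pqStep]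
            rw [if_neg hm2, if_neg hc, if_pos hch]
          rw [eA]
          simp only [pqRel]
          exact ⟨trivial, hb⟩
        · have eA : pqStep (qs, "", ac, ca) ln = (qs, "", ac, ca) := by
            simp only [pqStep]
            rw [if_neg hm2, if_neg hc, if_neg hch]
          rw [eA]
          simp only [pqRel]
          exact ⟨trivial, hb⟩
    · simp only [pqRel, if_neg hq] at h
      obtain ⟨hs, bs, body, hbl, hbs, hac, hca⟩ := h
      subst hs hbl
      have eB : pqBStep (bs ++ [q :: body], true) ln = (bs ++ [q :: (body ++ [ln])], true) := by
        simp [pqBStep, hm']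
        rw [pqAppendLast_append]
        simp
      rw [eB]
      by_cases hc : PySem.Str.startswith ln "Correct Answer:" = true
      · have eA : pqStep (qs, q, ac, ca) ln = (qs, q, ac, extractCorrect ln) := by
          simp only [pqStep]
          rw [if_neg hm2, if_pos hc]
        rw [eA]
        simp only [pqRel, if_neg hq]
        refine ⟨trivial, bs, body ++ [ln], rfl, hbs, ?_, ?_⟩
        · rw [hac, List.filter_append]
          simp [pq_correct_not_choice ln hc]
        · exact (lastCorrect_append_correct "" body ln hc).symm
      · have hcF : pqIsCorrect ln = false := by
          simp only [pqIsCorrect, Bool.eq_false_iff]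
          exact hc
        by_cases hch : (PySem.Str.startswith ln "A." || PySem.Str.startswith ln "B." ||
            PySem.Str.startswith ln "C." || PySem.Str.startswith ln "D." ||
            PySem.Str.startswith ln "E.") = true
        · have eA : pqStep (qs, q, ac, ca) ln = (qs, q, ac ++ [ln], ca) := by
            simp only [pqStep]
            rw [if_neg hm2, if_neg hc, if_pos hch]
          rw [eA]
          simp only [pqRel, if_neg hq]
          refine ⟨trivial, bs, body ++ [ln], rfl, hbs, ?_, ?_⟩
          · rw [hac, List.filter_append]
            simp [show pqIsChoice ln = true from hch]
          · rw [hca, lastCorrect_append_skip _ _ _ hcF]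
        · have hchF : pqIsChoice ln = false := by
            simp only [pqIsChoice, Bool.eq_false_iff]
            exact hch
          have eA : pqStep (qs, q, ac, ca) ln = (qs, q, ac, ca) := by
            simp only [pqStep]
            rw [if_neg hm2, if_neg hc, if_neg hch]
          rw [eA]
          simp only [pqRel, if_neg hq]
          refine ⟨trivial, bs, body ++ [ln], rfl, hbs, ?_, ?_⟩
          · rw [hac, List.filter_append]
            simp [hchF]
          · rw [hca, lastCorrect_append_skip _ _ _ hcF]

lemma pqRel_foldl (lines : List String)
    (stA : List (String × List String × String) × String × List String × String)
    (stB : List (List String) × Bool) (h : pqRel stA stB) :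
    pqRel (lines.foldl pqStep stA) (lines.foldl pqBStep stB) := by
  induction lines generalizing stA stB with
  | nil => exact h
  | cons l ls ih => exact ih _ _ (pqRel_step _ _ l h)

lemma pqRel_flush (stA : List (String × List String × String) × String × List String × String)
    (stB : List (List String) × Bool) (h : pqRel stA stB) :
    stB.1.map parseBlock = pqFlush stA := by
  obtain ⟨qs, q, ac, ca⟩ := stA
  obtain ⟨blocks, started⟩ := stB
  by_cases hq : q = ""
  · subst hq
    simp only [pqRel, if_pos] at h
    simp [pqFlush, h.2]
  · simp only [pqRel, if_neg hq] at h
    obtain ⟨-, bs, body, hbl, hbs, hac, hca⟩ := h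
    subst hbl
    simp [pqFlush, hq, hbs, parseBlock, hac, hca]

lemma pq_items (content : List String) :
    ∀ (qs : List (String × List String × String)) (blocks : List (List String)),
    blocks.map parseBlock = qs →
    (content.foldl (fun questions item =>
        pqFlush (((PySem.Str.split? item "\n").getD []).foldl pqStep (questions, "", [], ""))) qs)
      = (content.foldl (fun bl item =>
          (((PySem.Str.split? item "\n").getD []).foldl pqBStep (bl, false)).1) blocks).map parseBlock := by
  induction content with
  | nil => intro qs blocks h; simpa using h.symm
  | cons item rest ih =>
    intro qs blocks h
    simp only [List.foldl_cons]
    apply ih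
    exact pqRel_flush _ _ (pqRel_foldl _ (qs, "", [], "") (blocks, false)
      (by simp [pqRel, h]))

-- ===== VERDICT (by name: the statement is the Claim_ definition above) =====
theorem parse_questions_spec : Claim_equal_parse_questions := by
  intro content _
  unfold Spec_parse_questions parse_questions parse_questions_alt
  exact pq_items content [] [] rfl
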